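-- pv_equiv track=rewrite | github.com/tautautautautau/Advent-of-Code | 2015/2015_5.py | has_repeating_letter_with_one_between
-- ===== SOURCE A (Python) =====
-- def has_repeating_letter_with_one_between(s: str) -> bool:
--     # Loop through the string and check for each letter
--     # if it repeats with exactly one letter between them.
--     for i in range(len(s) - 2):
--         # Get the current letter and the two letters that follow it.
--         letter = s[i]
--         next_letter = s[i + 1]
--         next_next_letter = s[i + 2]
--
--         # Check if the current letter repeats with exactly one letter between them.
--         if letter == next_next_letter and next_letter != letter:
--             # If the current letter repeats with exactly one letter between them,
--             # return True.
--             return True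
--
--     # If we didn't find any letter that repeats with exactly one letter between them,
--     # return False.
--     return False
-- ===== SOURCE B (Python) =====
-- import re
--
-- _PAT = re.compile(r'(.)(?!\1)(.)\1', re.DOTALL)
--
-- def has_repeating_letter_with_one_between(s: str) -> bool:
--     # A match is a char, a different char, then the first char again:
--     # exactly "repeats with one letter between". DOTALL so '.' matches '\n'.
--     return bool(_PAT.search(s))
-- ===== Notes on version B (the rewrite author's own statement) =====
-- stated objective: idiomatic
-- what changed: Replaced the explicit index loop over triples with a single compiled regex search r'(.)(?!\1)(.)\1' with DOTALL: the capture, negative lookahead and backreference express the pattern declaratively and the whole scan runs inside the C regex engine.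
import Mathlib
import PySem

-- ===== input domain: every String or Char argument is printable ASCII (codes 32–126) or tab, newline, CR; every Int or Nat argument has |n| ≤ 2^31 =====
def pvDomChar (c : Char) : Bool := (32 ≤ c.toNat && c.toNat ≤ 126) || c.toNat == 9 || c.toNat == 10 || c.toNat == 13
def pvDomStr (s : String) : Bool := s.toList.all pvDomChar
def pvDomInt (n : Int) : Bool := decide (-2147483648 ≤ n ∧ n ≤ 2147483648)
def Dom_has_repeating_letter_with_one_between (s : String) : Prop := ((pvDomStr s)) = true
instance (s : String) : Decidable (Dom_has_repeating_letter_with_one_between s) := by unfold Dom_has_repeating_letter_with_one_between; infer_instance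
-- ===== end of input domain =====

-- B replaces A's index loop with a regex search r'(.)(?!\1)(.)\1' (DOTALL); Lean models the
-- regex semantics: try a match at every start position; at one position, capture a char,
-- assert the next char differs (lookahead), consume it, require the backreference.
-- Return value only.

-- ===== PORT A =====
-- loop body for `for i in range(len(s)-2): ...` with early return, over the char list
def pvALoop (cs : List Char) (i : Nat) : Bool :=
  if i < cs.length - 2 then
    -- letter = s[i]; next_letter = s[i+1]; next_next_letter = s[i+2]
    let letter := cs.getD i ' '
    let next_letter := cs.getD (i+1) ' '
    let next_next_letter := cs.getD (i+2) ' '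
    if letter == next_next_letter && next_letter != letter then true
    else pvALoop cs (i+1)
  else false
termination_by cs.length - i

def has_repeating_letter_with_one_between (s : String) : Bool :=
  pvALoop s.toList 0

-- ===== PORT B =====
-- semantics of matching the pattern (.)(?!\1)(.)\1 at the start of a suffix:
-- '(.)' captures c0; '(?!\1)' is a zero-width assertion that the next char is not c0;
-- '(.)' consumes that char; '\1' requires the next char to equal the capture.
def pvReMatchAt (suffix : List Char) : Bool :=
  match suffix with
  | c0 :: c1 :: c2 :: _ => (c1 != c0) && (c2 == c0)
  | _ => false  -- too few characters left: the pattern cannot match here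

-- re.search: try the pattern at every start position, left to right
def pvReSearch (suffix : List Char) : Bool :=
  pvReMatchAt suffix ||
    match suffix with
    | [] => false
    | _ :: rest => pvReSearch rest

def has_repeating_letter_with_one_between_alt (s : String) : Bool :=
  pvReSearch s.toList

-- ===== PRECONDITION & SPEC =====
def Spec_has_repeating_letter_with_one_between (s : String) (out : Bool) : Prop := out = has_repeating_letter_with_one_between_alt s
instance (s : String) (out : Bool) : Decidable (Spec_has_repeating_letter_with_one_between s out) := by unfold Spec_has_repeating_letter_with_one_between; infer_instance

-- ===== CLAIM (what is proved, stated in full; the proofs are below) =====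
def Claim_equal_has_repeating_letter_with_one_between : Prop := ∀ (s : String), Dom_has_repeating_letter_with_one_between s → Spec_has_repeating_letter_with_one_between s (has_repeating_letter_with_one_between s)

-- ===== LEMMAS AND PROOFS =====

lemma pvReSearch_short {cs : List Char} (h : cs.length < 3) : pvReSearch cs = false := by
  match cs, h with
  | [], _ => rfl
  | [a], _ => rfl
  | [a, b], _ => rfl
  | a :: b :: c :: rest, h => simp at h; omega

lemma pvALoop_eq_search (cs : List Char) (i : Nat) :
    pvALoop cs i = pvReSearch (cs.drop i) := by
  by_cases h : i < cs.length - 2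
  · have h2 : i + 2 < cs.length := by omega
    have h1 : i + 1 < cs.length := by omega
    have h0 : i < cs.length := by omega
    have hd : cs.drop i = cs[i] :: cs[i+1] :: cs[i+2] :: cs.drop (i+3) := by
      rw [List.drop_eq_getElem_cons h0, List.drop_eq_getElem_cons h1, List.drop_eq_getElem_cons h2]
    have hd1 : cs.drop (i+1) = cs[i+1] :: cs[i+2] :: cs.drop (i+3) := by
      rw [List.drop_eq_getElem_cons h1, List.drop_eq_getElem_cons h2]
    rw [pvALoop, if_pos h, hd, pvReSearch, pvReMatchAt]
    have ih := pvALoop_eq_search cs (i+1)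
    rw [hd1] at ih
    simp only [List.getD_eq_getElem _ _ h0, List.getD_eq_getElem _ _ h1,
      List.getD_eq_getElem _ _ h2, ← ih]
    have he' : (cs[i+2] == cs[i]) = (cs[i] == cs[i+2]) := by
      by_cases he : cs[i] = cs[i+2]
      · simp [he]
      · simp [he]
        exact fun hh => he (Eq.symm hh)
    rw [he', Bool.and_comm]
    cases (cs[i+1] != cs[i] && cs[i] == cs[i+2]) <;> simp
  · rw [pvALoop, if_neg h]
    rw [pvReSearch_short (by simp; omega)]
termination_by cs.length - i
decreasing_by omega

-- ===== VERDICT (by name: the statement is the Claim_ definition above) =====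
theorem has_repeating_letter_with_one_between_spec : Claim_equal_has_repeating_letter_with_one_between := by
  intro s _
  unfold Spec_has_repeating_letter_with_one_between
  unfold has_repeating_letter_with_one_between has_repeating_letter_with_one_between_alt
  rw [pvALoop_eq_search, List.drop_zero]
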